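-- pv_equiv track=rewrite | github.com/QuangPhung15/CompetitiveProgramming | codeforce/Python/800/Do Not Be Distracted!.py | solve
-- ===== SOURCE A (Python) =====
-- def solve(n, s):
-- 	seen = set()
-- 	i = 0
--
-- 	while (i < len(s)):
-- 		if (s[i] in seen):
-- 			return "NO"
--
-- 		seen.add(s[i])
-- 		i += 1
--
-- 		while (i < len(s) and s[i] == s[i - 1]):
-- 			i += 1
--
-- 	return "YES"
-- ===== SOURCE B (Python) =====
-- def solve(n, s):
--     pos = {}
--     for i, c in enumerate(s):
--         pos.setdefault(c, []).append(i)
--     for ps in pos.values():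
--         if ps[-1] - ps[0] + 1 != len(ps):
--             return "NO"
--     return "YES"
-- ===== Notes on version B (the rewrite author's own statement) =====
-- stated objective: alternative
-- what changed: B builds a char-to-positions index in one dict pass and then checks each occurrence list spans a contiguous index range (last - first + 1 == count), instead of A's left-to-right scan with a seen set, early return and an inner run-skipping while loop.
import Mathlib
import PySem

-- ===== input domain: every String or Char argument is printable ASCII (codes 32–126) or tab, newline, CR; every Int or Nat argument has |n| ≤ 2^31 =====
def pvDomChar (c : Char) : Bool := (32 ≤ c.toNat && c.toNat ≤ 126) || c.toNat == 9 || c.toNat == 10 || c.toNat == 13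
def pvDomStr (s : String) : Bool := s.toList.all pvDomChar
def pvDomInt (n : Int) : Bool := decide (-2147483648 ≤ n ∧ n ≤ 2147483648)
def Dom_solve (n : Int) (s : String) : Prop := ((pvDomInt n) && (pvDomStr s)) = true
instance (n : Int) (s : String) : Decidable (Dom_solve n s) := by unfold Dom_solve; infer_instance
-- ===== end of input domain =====

-- B replaces A's left-to-right scan (seen set + inner run-skipping loop) by a
-- char→positions index built in one dict pass, then checks each occurrence list
-- spans a contiguous index range (objective: alternative, same O(n)).

-- ===== PORT A =====
-- inner while: skip the run of characters equal to the one just consumed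
def skipA (c : Char) : List Char → List Char
  | [] => []
  | d :: t => if d == c then skipA c t else d :: t

theorem skipA_length_le (c : Char) (t : List Char) : (skipA c t).length ≤ t.length := by
  induction t with
  | nil => simp [skipA]
  | cons d t ih =>
    simp only [skipA]
    split
    · exact Nat.le_trans ih (Nat.le_succ _)
    · exact Nat.le_refl _

-- outer while over the remaining string, carrying the 'seen' set
def loopA (seen : PySem.Set Char) : List Char → String
  | [] => "YES"
  | c :: t =>
    if PySem.Set.contains seen c then "NO"
    else loopA (PySem.Set.add seen c) (skipA c t)
termination_by l => l.length
decreasing_by exact Nat.lt_succ_of_le (skipA_length_le _ _)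

def solve (_n : Int) (s : String) : String := loopA PySem.Set.empty s.toList

-- ===== PORT B =====
-- for ps in pos.values(): if ps[-1] - ps[0] + 1 != len(ps): return "NO"
-- (ps[-1] / ps[0] would raise IndexError on an empty ps in Python; the values of
--  pos are never empty, so the '.getD 0' totalization is never read)
def checkB : List (List Int) → String
  | [] => "YES"
  | ps :: rest =>
    if (PySem.List.pyGet? ps (-1)).getD 0 - (PySem.List.pyGet? ps 0).getD 0 + 1 ≠ (ps.length : Int)
    then "NO" else checkB rest

-- pos = {}; for i, c in enumerate(s): pos.setdefault(c, []).append(i)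
def solve_alt (_n : Int) (s : String) : String :=
  checkB (((PySem.List.enumerate s.toList).foldl
    (fun d ic => PySem.Dict.modify d ic.2 [] (· ++ [ic.1])) PySem.Dict.empty).values)

-- ===== PRECONDITION & SPEC =====
def Spec_solve (n : Int) (s : String) (out : String) : Prop := out = solve_alt n s
instance (n : Int) (s : String) (out : String) : Decidable (Spec_solve n s out) := by unfold Spec_solve; infer_instance

-- ===== CLAIM (what is proved, stated in full; the proofs are below) =====
def Claim_equal_solve : Prop := ∀ (n : Int) (s : String), Dom_solve n s → Spec_solve n s (solve n s)

-- ===== LEMMAS AND PROOFS =====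

-- consecutive-dedup with an explicit 'previous' value (the run representatives)
def dc (prev : Option Char) : List Char → List Char
  | [] => []
  | c :: t => if some c ≠ prev then c :: dc (some c) t else dc (some c) t

-- distinct-and-disjoint-from-seen check (the mathematical meaning of A's scan)
def chk (seen : PySem.Set Char) : List Char → Bool
  | [] => true
  | c :: t => !PySem.Set.contains seen c && chk (PySem.Set.add seen c) t

-- indices (from start s) at which c occurs
def occF (s : Int) (c : Char) (l : List Char) : List Int :=
  ((PySem.List.enumerate l s).filter (fun ic => ic.2 == c)).map (·.1)

-- the occurrence list spans a contiguous range
def pred (ps : List Int) : Bool := ps.getLastD 0 - ps.headD 0 + 1 == (ps.length : Int)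

-- ---- A-side characterisation ----

theorem dc_skipA (c : Char) (t : List Char) : dc none (skipA c t) = dc (some c) t := by
  induction t with
  | nil => simp [skipA, dc]
  | cons d t ih =>
    simp only [skipA, dc]
    by_cases h : d = c
    · subst h; simp [ih]
    · simp [h, dc]

theorem loopA_eq_chk (l : List Char) (seen : PySem.Set Char) :
    loopA seen l = if chk seen (dc none l) then "YES" else "NO" := by
  induction hn : l.length using Nat.strong_induction_on generalizing l seen with
  | _ n ih =>
    cases l with
    | nil => simp [loopA, dc, chk]
    | cons c t =>
      rw [loopA]
      have hdc : dc none (c :: t) = c :: dc (some c) t := by simp [dc]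
      rw [hdc]
      by_cases h : PySem.Set.contains seen c = true
      · have hm : c ∈ seen := (PySem.Set.contains_iff seen c).mp h
        simp [hm, chk]
      · rw [if_neg h,
          ih (skipA c t).length (by subst hn; exact Nat.lt_succ_of_le (skipA_length_le _ _)) _ _ rfl,
          dc_skipA]
        have hm : c ∉ seen := fun hmm => h ((PySem.Set.contains_iff seen c).mpr hmm)
        simp [chk, hm]

theorem chk_iff (m : List Char) (seen : PySem.Set Char) :
    chk seen m = true ↔ m.Nodup ∧ ∀ x ∈ m, ¬ x ∈ seen := by
  induction m generalizing seen with
  | nil => simp [chk]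
  | cons c t ih =>
    simp only [chk, Bool.and_eq_true, Bool.not_eq_true', List.nodup_cons, List.mem_cons]
    rw [ih]
    constructor
    · rintro ⟨hc, ht, hall⟩
      have hcs : ¬ c ∈ seen := fun hmem => by
        rw [(PySem.Set.contains_iff seen c).mpr hmem] at hc; cases hc
      refine ⟨⟨fun hct => (hall c hct) ((PySem.Set.mem_add seen c c).mpr (Or.inr rfl)), ht⟩, ?_⟩
      rintro x (rfl | hx)
      · exact hcs
      · exact fun hxs => hall x hx ((PySem.Set.mem_add seen c x).mpr (Or.inl hxs))
    · rintro ⟨⟨hct, ht⟩, hall⟩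
      have hcs := hall c (Or.inl rfl)
      refine ⟨?_, ht, ?_⟩
      · cases hcc : PySem.Set.contains seen c
        · rfl
        · exact absurd ((PySem.Set.contains_iff seen c).mp hcc) hcs
      · intro x hx hxa
        rcases (PySem.Set.mem_add seen c x).mp hxa with h | rfl
        · exact hall x (Or.inr hx) h
        · exact hct hx

-- membership in dc
theorem dc_subset (prev : Option Char) (m : List Char) (x : Char) (h : x ∈ dc prev m) : x ∈ m := by
  induction m generalizing prev with
  | nil => simp [dc] at h
  | cons c t ih =>
    simp only [dc] at h
    split at h
    · rcases List.mem_cons.mp h with rfl | h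
      · exact List.mem_cons_self
      · exact List.mem_cons_of_mem _ (ih _ h)
    · exact List.mem_cons_of_mem _ (ih _ h)

theorem mem_dc_or (prev : Option Char) (m : List Char) (x : Char) (h : x ∈ m) :
    x ∈ dc prev m ∨ some x = prev := by
  induction m generalizing prev with
  | nil => simp at h
  | cons c t ih =>
    simp only [dc]
    rcases List.mem_cons.mp h with rfl | hx
    · by_cases hp : some x ≠ prev
      · rw [if_pos hp]; exact Or.inl List.mem_cons_self
      · exact Or.inr (not_not.mp hp)
    · rcases ih (some c) hx with hin | hxc
      · split
        · exact Or.inl (List.mem_cons_of_mem _ hin)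
        · exact Or.inl hin
      · have hxc' : x = c := by injection hxc
        subst hxc'
        by_cases hp : some x ≠ prev
        · rw [if_pos hp]; exact Or.inl List.mem_cons_self
        · exact Or.inr (not_not.mp hp)

theorem mem_dc_none (m : List Char) (x : Char) : x ∈ dc none m ↔ x ∈ m := by
  constructor
  · exact dc_subset none m x
  · intro h
    rcases mem_dc_or none m x h with h | h
    · exact h
    · cases h

-- ---- dc through a leading run ----

theorem dc_some_of_head (c : Char) (r : List Char) (h : r.head? ≠ some c) :
    dc (some c) r = dc none r := by
  cases r with
  | nil => rfl
  | cons d r' =>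
    simp only [List.head?_cons, ne_eq, Option.some.injEq] at h
    simp [dc, fun hh : d = c => h hh]

theorem dc_some_replicate (c : Char) (k : Nat) (r : List Char) :
    dc (some c) (List.replicate k c ++ r) = dc (some c) r := by
  induction k with
  | zero => simp
  | succ k ih =>
    rw [List.replicate_succ, List.cons_append]
    have h2 : dc (some c) (c :: (List.replicate k c ++ r)) = dc (some c) (List.replicate k c ++ r) := by
      simp [dc]
    rw [h2, ih]

theorem dc_none_run (k : Nat) (c : Char) (r : List Char) (h : r.head? ≠ some c) :
    dc none (List.replicate (k + 1) c ++ r) = c :: dc none r := by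
  rw [List.replicate_succ, List.cons_append]
  have h1 : dc none (c :: (List.replicate k c ++ r)) = c :: dc (some c) (List.replicate k c ++ r) := by
    simp [dc]
  rw [h1, dc_some_replicate, dc_some_of_head c r h]

-- ---- occF basics ----

theorem occF_cons (s : Int) (c d : Char) (t : List Char) :
    occF s c (d :: t) = if d = c then s :: occF (s + 1) c t else occF (s + 1) c t := by
  unfold occF
  rw [PySem.List.enumerate_cons]
  by_cases h : d = c
  · subst h; simp
  · simp [h]

theorem occF_append (s : Int) (c : Char) (a b : List Char) :
    occF s c (a ++ b) = occF s c a ++ occF (s + a.length) c b := by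
  unfold occF
  rw [PySem.List.enumerate_append, List.filter_append, List.map_append]

theorem occF_eq_nil (s : Int) (c : Char) (m : List Char) (h : ¬ c ∈ m) : occF s c m = [] := by
  induction m generalizing s with
  | nil => rfl
  | cons d t ih =>
    have hdc : d ≠ c := fun hh => h (by rw [hh]; exact List.mem_cons_self)
    rw [occF_cons, if_neg hdc]
    exact ih _ (fun hc => h (List.mem_cons_of_mem _ hc))

theorem occF_ne_nil (s : Int) (c : Char) (m : List Char) (h : c ∈ m) : occF s c m ≠ [] := by
  induction m generalizing s with
  | nil => simp at h
  | cons d t ih =>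
    rw [occF_cons]
    by_cases hdc : d = c
    · simp [hdc]
    · rw [if_neg hdc]
      rcases List.mem_cons.mp h with rfl | hc
      · exact absurd rfl hdc
      · exact ih _ hc

theorem mem_occF_lb (s : Int) (c : Char) (m : List Char) (j : Int) (h : j ∈ occF s c m) : s ≤ j := by
  unfold occF at h
  obtain ⟨ic, hic, rfl⟩ := List.mem_map.mp h
  obtain ⟨k, hk, rfl⟩ := (PySem.List.mem_enumerate_iff m s ic).mp (List.mem_filter.mp hic).1
  simp

theorem occF_pairwise (s : Int) (c : Char) (m : List Char) : (occF s c m).Pairwise (· < ·) := by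
  exact ((PySem.List.pairwise_lt_enumerate m s).filter _).map _ (fun a b h => h)

theorem occF_replicate_ne (s : Int) (x c : Char) (k : Nat) (h : x ≠ c) :
    occF s x (List.replicate k c) = [] := by
  induction k generalizing s with
  | zero => rfl
  | succ k ih => rw [List.replicate_succ, occF_cons, if_neg (fun hh => h hh.symm)]; exact ih _

theorem occF_replicate_self_length (s : Int) (c : Char) (k : Nat) :
    (occF s c (List.replicate k c)).length = k := by
  induction k generalizing s with
  | zero => rfl
  | succ k ih => rw [List.replicate_succ, occF_cons, if_pos rfl, List.length_cons, ih]

theorem occF_replicate_self_head (s : Int) (c : Char) (k : Nat) :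
    (occF s c (List.replicate (k + 1) c)).headD 0 = s := by
  rw [List.replicate_succ, occF_cons, if_pos rfl]; rfl

theorem getLastD_indep (ps : List Int) (h : ps ≠ []) (a b : Int) : ps.getLastD a = ps.getLastD b := by
  cases hq : ps.getLast? with
  | none => exact absurd (List.getLast?_eq_none_iff.mp hq) h
  | some y => rw [List.getLastD_eq_getLast?, List.getLastD_eq_getLast?, hq]; rfl

theorem occF_replicate_self_last (s : Int) (c : Char) (k : Nat) :
    (occF s c (List.replicate (k + 1) c)).getLastD 0 = s + k := by
  induction k generalizing s with
  | zero => rw [List.replicate_succ, occF_cons, if_pos rfl]; simp [occF]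
  | succ k ih =>
    rw [List.replicate_succ, occF_cons, if_pos rfl, List.getLastD_cons]
    have hne : occF (s + 1) c (List.replicate (k + 1) c) ≠ [] :=
      occF_ne_nil _ _ _ (by simp)
    rw [getLastD_indep _ hne s 0, ih (s + 1)]
    push_cast
    ring

theorem sorted_span (ps : List Int) (h : ps.Pairwise (· < ·)) (hne : ps ≠ []) :
    ps.headD 0 + ps.length ≤ ps.getLastD 0 + 1 := by
  induction ps with
  | nil => cases hne rfl
  | cons x t ih =>
    cases t with
    | nil => simp
    | cons y t' =>
      rw [List.pairwise_cons] at h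
      obtain ⟨hx, ht⟩ := h
      have ihh := ih ht (by simp)
      have hxy : x < y := hx y List.mem_cons_self
      have hlast : (x :: y :: t').getLastD 0 = (y :: t').getLastD 0 := by
        rw [List.getLastD_cons]; exact getLastD_indep _ (by simp) _ _
      rw [hlast]
      simp only [List.headD_cons, List.length_cons] at *
      push_cast at *
      omega

theorem headD_append_left (R S : List Int) (h : R ≠ []) : (R ++ S).headD 0 = R.headD 0 := by
  cases R with
  | nil => cases h rfl
  | cons x R' => simp

theorem getLastD_append_right (R S : List Int) (h : S ≠ []) : (R ++ S).getLastD 0 = S.getLastD 0 := by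
  rw [List.getLastD_eq_getLast?, List.getLastD_eq_getLast?, List.getLast?_append]
  cases hq : S.getLast? with
  | none => exact absurd (List.getLast?_eq_none_iff.mp hq) h
  | some y => rfl

-- ---- the central equivalence ----

theorem main_iff (l : List Char) : ∀ (s : Int),
    ((dc none l).Nodup ↔ ∀ c ∈ l, pred (occF s c l) = true) := by
  induction hn : l.length using Nat.strong_induction_on generalizing l with
  | _ n ih =>
    intro s
    cases l with
    | nil => simp [dc]
    | cons c0 t =>
      have htw : List.takeWhile (· == c0) t = List.replicate (List.takeWhile (· == c0) t).length c0 :=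
        List.eq_replicate_iff.mpr ⟨rfl, fun b hb => by simpa using List.mem_takeWhile_imp hb⟩
      set k' := (List.takeWhile (· == c0) t).length with hk'
      set r := List.dropWhile (· == c0) t with hr
      have hsplit : c0 :: t = List.replicate (k' + 1) c0 ++ r := by
        rw [List.replicate_succ, List.cons_append]
        congr 1
        rw [← htw]
        exact (List.takeWhile_append_dropWhile).symm
      have hhead : r.head? ≠ some c0 := by
        intro hcon
        have hh := List.head?_dropWhile_not (· == c0) t
        rw [← hr, hcon] at hh
        simp at hh
      have htlen : t.length = k' + r.length := by
        have h2 := congrArg List.length (List.takeWhile_append_dropWhile (p := (· == c0)) (l := t))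
        rw [List.length_append] at h2
        rw [hk', hr]
        omega
      have hrlt : r.length < n := by
        rw [← hn]; simp; omega
      have IH : ∀ s' : Int, ((dc none r).Nodup ↔ ∀ x ∈ r, pred (occF s' x r) = true) :=
        fun s' => ih r.length hrlt r rfl s'
      have hdc : dc none (c0 :: t) = c0 :: dc none r := by
        rw [hsplit]; exact dc_none_run _ _ _ hhead
      have hmemr : ∀ x, x ∈ r → x ∈ c0 :: t := by
        intro x hx
        rw [hsplit]
        exact List.mem_append_right _ hx
      have hoccsplit : ∀ x : Char,
          occF s x (c0 :: t) = occF s x (List.replicate (k' + 1) c0) ++ occF (s + (k' + 1)) x r := by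
        intro x
        conv_lhs => rw [hsplit]
        rw [occF_append]
        simp
      have hoccne : ∀ x : Char, x ≠ c0 → occF s x (c0 :: t) = occF (s + (k' + 1)) x r := by
        intro x hx
        rw [hoccsplit, occF_replicate_ne _ _ _ _ hx, List.nil_append]
      have hmemt : ∀ x, x ∈ t → x ≠ c0 → x ∈ r := by
        intro x hx hxc
        rcases List.mem_append.mp ((List.takeWhile_append_dropWhile (p := (· == c0)) (l := t)) ▸ hx) with h | h
        · exact absurd (by simpa using List.mem_takeWhile_imp h) hxc
        · exact h
      rw [hdc, List.nodup_cons]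
      constructor
      · rintro ⟨hc0, hnd⟩
        have hc0r : c0 ∉ r := fun hh => hc0 ((mem_dc_none r c0).mpr hh)
        intro x hx
        by_cases hxc : x = c0
        · subst hxc
          rw [hoccsplit, occF_eq_nil _ _ _ hc0r, List.append_nil]
          simp only [pred, beq_iff_eq]
          rw [occF_replicate_self_head, occF_replicate_self_last, occF_replicate_self_length]
          push_cast
          ring
        · have hxr : x ∈ r := hmemt x (by rcases List.mem_cons.mp hx with rfl | h; exact absurd rfl hxc; exact h) hxc
          rw [hoccne x hxc]
          exact (IH (s + (k' + 1))).mp hnd x hxr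
      · intro hall
        have hc0r : c0 ∉ r := by
          intro hc0r
          have hp := hall c0 List.mem_cons_self
          rw [hoccsplit] at hp
          simp only [pred, beq_iff_eq] at hp
          have hSne : occF (s + (k' + 1)) c0 r ≠ [] := occF_ne_nil _ _ _ hc0r
          have hRne : occF s c0 (List.replicate (k' + 1) c0) ≠ [] := occF_ne_nil _ _ _ (by simp)
          rw [headD_append_left _ _ hRne, getLastD_append_right _ _ hSne,
            occF_replicate_self_head, List.length_append, occF_replicate_self_length] at hp
          -- every element of occF (s+(k'+1)) c0 r is ≥ s + k' + 2 (r does not start with c0)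
          have hSlb : (occF (s + (k' + 1)) c0 r).headD 0 ≥ s + (k' + 1) + 1 := by
            cases hrr : r with
            | nil => rw [hrr] at hc0r; simp at hc0r
            | cons d r' =>
              have hd : d ≠ c0 := by
                rw [hrr] at hhead; simpa using hhead
              rw [occF_cons, if_neg hd]
              have hne2 : occF (s + (k' + 1) + 1) c0 r' ≠ [] := by
                rw [hrr] at hc0r
                rcases List.mem_cons.mp hc0r with rfl | hcc
                · exact absurd rfl hd
                · exact occF_ne_nil _ _ _ hcc
              cases hq : occF (s + (k' + 1) + 1) c0 r' with
              | nil => exact absurd hq hne2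
              | cons y S' =>
                have hy : y ∈ occF (s + (k' + 1) + 1) c0 r' := by rw [hq]; exact List.mem_cons_self
                have hlb := mem_occF_lb _ _ _ _ hy
                simpa using hlb
          have hspan : (occF (s + (k' + 1)) c0 r).headD 0 + (occF (s + (k' + 1)) c0 r).length ≤
              (occF (s + (k' + 1)) c0 r).getLastD 0 + 1 :=
            sorted_span _ (occF_pairwise _ _ _) hSne
          push_cast at hp
          omega
        refine ⟨fun hc => hc0r ((mem_dc_none r c0).mp hc), ?_⟩
        refine (IH (s + (k' + 1))).mpr ?_
        intro x hxr
        have hxc : x ≠ c0 := fun hh => hc0r (hh ▸ hxr)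
        rw [← hoccne x hxc]
        exact hall x (hmemr x hxr)

-- ---- bridging the ports ----

theorem pyGetD_neg_one (ps : List Int) : (PySem.List.pyGet? ps (-1)).getD 0 = ps.getLastD 0 := by
  cases ps <;> simp [PySem.List.pyGet?, PySem.List.pyIdx?, List.getLastD_eq_getLast?,
    List.getLast?_eq_getElem?]

theorem pyGetD_zero (ps : List Int) : (PySem.List.pyGet? ps 0).getD 0 = ps.headD 0 := by
  cases ps <;> simp [PySem.List.pyGet?, PySem.List.pyIdx?]

theorem checkB_iff (L : List (List Int)) :
    checkB L = if L.all pred then "YES" else "NO" := by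
  induction L with
  | nil => simp [checkB]
  | cons ps rest ih =>
    rw [checkB, pyGetD_neg_one, pyGetD_zero, ih]
    by_cases hp : ps.getLastD 0 - ps.headD 0 + 1 = (ps.length : Int)
    · rw [if_neg (not_not_intro hp)]
      have hb : pred ps = true := by unfold pred; exact beq_iff_eq.mpr hp
      simp [List.all_cons, hb]
    · rw [if_pos hp]
      have hb : pred ps = false := by unfold pred; exact beq_eq_false_iff_ne.mpr hp
      simp [List.all_cons, hb]

theorem solve_eq (n : Int) (s : String) : solve n s = solve_alt n s := by
  unfold solve solve_alt
  rw [loopA_eq_chk]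
  set l := s.toList with hl
  set pos := (PySem.List.enumerate l).foldl
      (fun (d : PySem.Dict Char (List Int)) (ic : Int × Char) =>
        PySem.Dict.modify d ic.2 [] (· ++ [ic.1])) PySem.Dict.empty with hpos
  have hkn : pos.keys.Nodup := by
    rw [hpos]
    exact PySem.Dict.nodup_keys_foldl_modify_key _ (·.2) []
      (fun (_ : PySem.Dict Char (List Int)) (ic : Int × Char) (v : List Int) => v ++ [ic.1]) _
      (by rw [PySem.Dict.keys_empty]; simp)
  have hkeys : pos.keys = PySem.Set.ofList l := by
    rw [hpos,
      PySem.Dict.keys_foldl_modify_key (PySem.List.enumerate l 0) (·.2) []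
        (fun (_ : PySem.Dict Char (List Int)) (ic : Int × Char) (v : List Int) => v ++ [ic.1]) _,
      PySem.Dict.keys_empty, PySem.List.map_snd_enumerate, PySem.Set.ofList_eq_foldl]
    rfl
  have hgetD : ∀ c, pos.getD c [] = occF 0 c l := by
    intro c
    have hswap : pos = ((PySem.List.enumerate l 0).map (fun ic => (ic.2, ic.1))).foldl
        (fun d p => PySem.Dict.modify d p.1 [] (· ++ [p.2])) PySem.Dict.empty := by
      rw [hpos, List.foldl_map]
    rw [hswap, PySem.Dict.getD_foldl_modify_append, PySem.Dict.getD_empty, List.nil_append]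
    unfold occF
    rw [List.filter_map, List.map_map]
    rfl
  have hvals : pos.values = (PySem.Set.ofList l).map (fun c => occF 0 c l) := by
    rw [PySem.Dict.values_eq_map_keys pos hkn [], hkeys]
    exact List.map_congr_left (fun a _ => hgetD a)
  rw [hvals, checkB_iff]
  have hcond : (chk PySem.Set.empty (dc none l) = true) ↔
      (((PySem.Set.ofList l).map (fun c => occF 0 c l)).all pred = true) := by
    rw [chk_iff]
    have hempty : ∀ x : Char, ¬ x ∈ (PySem.Set.empty : PySem.Set Char) := by
      intro x hx
      exact List.not_mem_nil hx
    rw [List.all_eq_true]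
    constructor
    · rintro ⟨hnd, -⟩
      intro ps hps
      obtain ⟨c, hc, rfl⟩ := List.mem_map.mp hps
      exact (main_iff l 0).mp hnd c ((PySem.Set.mem_ofList l c).mp hc)
    · intro hall
      refine ⟨(main_iff l 0).mpr ?_, fun x _ => hempty x⟩
      intro c hc
      exact hall _ (List.mem_map.mpr ⟨c, (PySem.Set.mem_ofList l c).mpr hc, rfl⟩)
  by_cases h : chk PySem.Set.empty (dc none l) = true
  · rw [if_pos h, if_pos (hcond.mp h)]
  · rw [if_neg h, if_neg (fun hh => h (hcond.mpr hh))]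

-- ===== VERDICT (by name: the statement is the Claim_ definition above) =====
theorem solve_spec : Claim_equal_solve := by
  intro n s _
  unfold Spec_solve
  exact solve_eq n s
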